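-- pv_equiv track=rewrite | github.com/Pugn0/threading-python | pugno.py | dividir_dados
-- ===== SOURCE A (Python) =====
-- def dividir_dados(data, n):
--     tamanho_total = len(data)
--     tamanho_parte = tamanho_total // n
--     sobra = tamanho_total % n
--     partes = []
--     inicio = 0
--
--     for i in range(n):
--         fim = inicio + tamanho_parte + (1 if i < sobra else 0)
--         partes.append(data[inicio:fim])
--         inicio = fim
--
--     return partes
-- ===== SOURCE B (Python) =====
-- def dividir_dados(data, n):
--     partes = []
--     rest = data
--     m = n
--     while m > 0:
--         k = -(-len(rest) // m)
--         partes.append(rest[:k])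
--         rest = rest[k:]
--         m -= 1
--     return partes
-- ===== Notes on version B (the rewrite author's own statement) =====
-- stated objective: alternative
-- what changed: Replaced the precomputed quotient/remainder plus a running start-index over fixed data with a consume-the-remainder loop: each step recomputes the ceiling division ceil(len(rest)/m) on the shrinking remainder list, peels that prefix off, and decrements the chunk count, with no precomputed chunk size/sobra and no indices into the original list.
import Mathlib
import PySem

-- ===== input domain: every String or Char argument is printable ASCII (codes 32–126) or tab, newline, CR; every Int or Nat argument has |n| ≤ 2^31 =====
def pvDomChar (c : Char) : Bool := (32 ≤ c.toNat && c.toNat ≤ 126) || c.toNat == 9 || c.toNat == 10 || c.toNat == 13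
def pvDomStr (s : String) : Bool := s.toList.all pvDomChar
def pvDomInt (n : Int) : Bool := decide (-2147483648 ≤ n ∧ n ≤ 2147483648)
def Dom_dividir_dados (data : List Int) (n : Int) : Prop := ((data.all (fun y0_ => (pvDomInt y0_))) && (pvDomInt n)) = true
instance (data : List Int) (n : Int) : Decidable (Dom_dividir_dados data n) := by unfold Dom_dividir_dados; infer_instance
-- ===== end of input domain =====

-- B replaces A's precomputed-quotient loop over a running start index with a
-- consume-the-remainder loop that peels ceil(len(rest)/m) elements off the front
-- each step; objective: alternative decomposition.


-- ===== PORT A =====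
def dividir_dados (data : List Int) (n : Int) : List (List Int) :=
  let tamanho_total : Int := data.length
  let tamanho_parte := PySem.Int.floordiv tamanho_total n
  let sobra := PySem.Int.mod tamanho_total n
  let st :=
    (PySem.List.pyRange 0 n 1).foldl
      (fun (st : List (List Int) × Int) i =>
        let fim := st.2 + tamanho_parte + (if i < sobra then 1 else 0)
        (st.1 ++ [PySem.List.slice data (some st.2) (some fim)], fim))
      ([], 0)
  st.1

-- ===== PORT B =====
-- the while loop of Source B: state (partes, rest, m); each iteration peels
-- k = -(-len(rest) // m) elements off the front of rest
def pvAltLoop (partes : List (List Int)) (rest : List Int) (m : Int) : List (List Int) :=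
  if h : 0 < m then
    let k := -(PySem.Int.floordiv (-(rest.length : Int)) m)
    pvAltLoop (partes ++ [PySem.List.slice rest none (some k)])
              (PySem.List.slice rest (some k) none) (m - 1)
  else partes
termination_by m.toNat
decreasing_by exact (by omega : (m - 1).toNat < m.toNat)

def dividir_dados_alt (data : List Int) (n : Int) : List (List Int) :=
  pvAltLoop [] data n

-- ===== PRECONDITION & SPEC =====
-- A raises ZeroDivisionError exactly when n = 0; Pre_ excludes only that.
def Pre_dividir_dados (data : List Int) (n : Int) : Prop := n ≠ 0
instance (data : List Int) (n : Int) : Decidable (Pre_dividir_dados data n) := by unfold Pre_dividir_dados; infer_instance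
def pvWitness_dividir_dados : List Int × Int := ([1, 2, 3, 4, 5], 2)

def Spec_dividir_dados (data : List Int) (n : Int) (out : List (List Int)) : Prop := out = dividir_dados_alt data n
instance (data : List Int) (n : Int) (out : List (List Int)) : Decidable (Spec_dividir_dados data n out) := by unfold Spec_dividir_dados; infer_instance

-- ===== CLAIM (what is proved, stated in full; the proofs are below) =====
def Claim_equal_dividir_dados : Prop := ∀ (data : List Int) (n : Int), Dom_dividir_dados data n → Pre_dividir_dados data n → Spec_dividir_dados data n (dividir_dados data n)

-- ===== LEMMAS AND PROOFS =====

-- the chunk boundary of a length-t list split into m parts: bndf t m i = i*(t//m) + min i (t%m)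
def bndf (t m i : Int) : Int := i * PySem.Int.floordiv t m + min i (PySem.Int.mod t m)

lemma mod_nonneg_of_pos (a n : Int) (hn : 0 < n) : 0 ≤ PySem.Int.mod a n := by
  rw [PySem.Int.mod_eq_emod_of_pos hn]
  exact Int.emod_nonneg a (by omega)

lemma mod_lt_of_pos (a n : Int) (hn : 0 < n) : PySem.Int.mod a n < n := by
  rw [PySem.Int.mod_eq_emod_of_pos hn]
  exact Int.emod_lt_of_pos a hn

lemma floordiv_nonneg_of_pos (a n : Int) (ha : 0 ≤ a) (hn : 0 < n) :
    0 ≤ PySem.Int.floordiv a n := by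
  rw [PySem.Int.floordiv_eq_ediv_of_pos hn]
  exact Int.ediv_nonneg ha (by omega)

-- the per-step peel amount is q + (1 if r > 0 else 0)
lemma ceil_eq (t m : Int) (hm : 0 < m) :
    -(PySem.Int.floordiv (-t) m)
      = PySem.Int.floordiv t m + (if 0 < PySem.Int.mod t m then 1 else 0) := by
  have hqm := PySem.Int.floordiv_mul_add_mod t m
  have hr0 := mod_nonneg_of_pos t m hm
  have hrlt := mod_lt_of_pos t m hm
  apply (PySem.Int.neg_floordiv_neg_eq_iff_of_pos hm).mpr
  split_ifs with h <;> constructor <;> nlinarith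

-- unfolding equations for pvAltLoop
lemma pvAltLoop_pos (partes : List (List Int)) (rest : List Int) {m : Int} (h : 0 < m) :
    pvAltLoop partes rest m
      = pvAltLoop (partes ++ [PySem.List.slice rest none (some (-(PySem.Int.floordiv (-(rest.length : Int)) m)))])
          (PySem.List.slice rest (some (-(PySem.Int.floordiv (-(rest.length : Int)) m))) none) (m - 1) := by
  rw [pvAltLoop, dif_pos h]

lemma pvAltLoop_neg (partes : List (List Int)) (rest : List Int) {m : Int} (h : ¬ 0 < m) :
    pvAltLoop partes rest m = partes := by
  rw [pvAltLoop, dif_neg h]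

-- A's fold over pyRange a n 1, started at the closed-form boundary, is the map of slices
lemma foldA (data : List Int) (n q r : Int) :
    ∀ (m : Nat) (a : Int) (acc : List (List Int)), a + m = n →
    ((PySem.List.pyRange a n 1).foldl
        (fun (st : List (List Int) × Int) i =>
          let fim := st.2 + q + (if i < r then 1 else 0)
          (st.1 ++ [PySem.List.slice data (some st.2) (some fim)], fim))
        (acc, a * q + min a r))
      = (acc ++ (PySem.List.pyRange a n 1).map
            (fun i => PySem.List.slice data (some (i * q + min i r)) (some ((i + 1) * q + min (i + 1) r))),
         n * q + min n r) := by
  intro m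
  induction m with
  | zero =>
      intro a acc h
      have ha : a = n := by omega
      subst ha
      rw [PySem.List.pyRange_one_eq_nil le_rfl]
      simp
  | succ k ih =>
      intro a acc h
      have hab : a < n := by omega
      rw [PySem.List.pyRange_one_cons hab]
      simp only [List.foldl_cons, List.map_cons]
      have hstep : a * q + min a r + q + (if a < r then 1 else 0)
          = (a + 1) * q + min (a + 1) r := by
        split_ifs with hh <;> ring_nf <;> omega
      rw [hstep]
      have := ih (a + 1) (acc ++ [PySem.List.slice data (some (a * q + min a r)) (some ((a + 1) * q + min (a + 1) r))]) (by omega)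
      rw [this]
      simp

-- B's loop, characterised by the same closed-form boundaries on the current remainder
lemma loopB : ∀ (fuel : Nat) (m : Int), m ≤ fuel → ∀ (rest : List Int) (partes : List (List Int)),
    pvAltLoop partes rest m
      = partes ++ (PySem.List.pyRange 0 m 1).map
          (fun i => PySem.List.slice rest (some (bndf rest.length m i)) (some (bndf rest.length m (i + 1)))) := by
  intro fuel
  induction fuel with
  | zero =>
      intro m hm rest partes
      rw [pvAltLoop_neg _ _ (by omega : ¬ 0 < m), PySem.List.pyRange_one_eq_nil (by omega : m ≤ 0)]
      simp
  | succ fl ih =>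
      intro m hm rest partes
      by_cases hmpos : 0 < m
      · rw [pvAltLoop_pos _ _ hmpos]
        set t : Int := (rest.length : Int) with ht
        have ht0 : 0 ≤ t := by positivity
        set q := PySem.Int.floordiv t m with hq
        set r := PySem.Int.mod t m with hrdef
        have hqm : q * m + r = t := by
          rw [hq, hrdef]; exact PySem.Int.floordiv_mul_add_mod t m
        have hr0 : 0 ≤ r := mod_nonneg_of_pos t m hmpos
        have hrlt : r < m := mod_lt_of_pos t m hmpos
        have hq0 : 0 ≤ q := floordiv_nonneg_of_pos t m ht0 hmpos
        have hk : -(PySem.Int.floordiv (-t) m) = q + (if 0 < r then 1 else 0) :=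
          ceil_eq t m hmpos
        set k : Int := -(PySem.Int.floordiv (-t) m) with hkdef
        have hk0 : 0 ≤ k := by rw [hk]; split_ifs <;> omega
        have hkt : k ≤ t := by
          rw [hk]
          have hqm1 : 0 ≤ q * (m - 1) := mul_nonneg hq0 (by omega)
          split_ifs with h <;> nlinarith
        have hrest' : PySem.List.slice rest (some k) none = rest.drop k.toNat :=
          PySem.List.slice_from rest hk0
        have ht' : ((rest.drop k.toNat).length : Int) = t - k := by
          simp only [List.length_drop]
          omega
        rw [hrest', ih (m - 1) (by omega)]
        rw [PySem.List.pyRange_one_cons hmpos, List.map_cons]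
        -- head chunk: bndf t m 0 = 0, bndf t m 1 = k
        have hb0 : bndf t m 0 = 0 := by
          simp [bndf, ← hq, ← hrdef, min_eq_left hr0]
        have hb1 : bndf t m 1 = k := by
          rw [hk]
          simp only [bndf, ← hq, ← hrdef, one_mul]
          have hmin : min 1 r = (if 0 < r then 1 else 0) := by
            split_ifs with h <;> omega
          rw [hmin]
        -- tail chunks: shift by k
        have htail : (PySem.List.pyRange 0 (m - 1) 1).map
              (fun i => PySem.List.slice (rest.drop k.toNat)
                  (some (bndf ((rest.drop k.toNat).length : Int) (m - 1) i))
                  (some (bndf ((rest.drop k.toNat).length : Int) (m - 1) (i + 1))))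
            = (PySem.List.pyRange 1 m 1).map
              (fun i => PySem.List.slice rest (some (bndf t m i)) (some (bndf t m (i + 1)))) := by
          rw [PySem.List.pyRange_one 0 (m - 1), PySem.List.pyRange_one 1 m]
          have hlen : (m - 1 - 0).toNat = (m - 1).toNat := by omega
          rw [hlen]
          rw [List.map_map, List.map_map]
          apply List.map_congr_left
          intro j hj
          have hjlt : (j : Int) < m - 1 := by
            have := List.mem_range.mp hj; omega
          have hj0 : (0 : Int) ≤ (j : Int) := by positivity
          simp only [Function.comp_apply, zero_add]
          have h1j : (1 : Int) + (j : Int) = (j : Int) + 1 := by ring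
          rw [h1j]
          set i : Int := (j : Int) with hi
          have hm2 : 2 ≤ m := by omega
          set t' : Int := ((rest.drop k.toNat).length : Int) with ht'def
          have ht'val : t' = t - k := ht'
          set q' := PySem.Int.floordiv t' (m - 1) with hq'
          set r' := PySem.Int.mod t' (m - 1) with hr'
          have hq'm : q' * (m - 1) + r' = t' := by
            rw [hq', hr']; exact PySem.Int.floordiv_mul_add_mod t' (m - 1)
          have hq'eq : q' = q := by
            rw [hq']
            apply (PySem.Int.floordiv_eq_iff_of_pos (by omega : (0:Int) < m - 1)).mpr
            rw [hk] at ht'val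
            constructor <;> (rw [ht'val]; split_ifs with h <;> nlinarith)
          have hr'eq : r' = r - (if 0 < r then 1 else 0) := by
            rw [hq'eq] at hq'm
            rw [hk] at ht'val
            have hx : q * (m - 1) = q * m - q := by ring
            rw [hx] at hq'm
            split_ifs at ht'val ⊢ with h <;> linarith
          have hr'0 : 0 ≤ r' := by rw [hr'eq]; split_ifs with h <;> omega
          -- boundary shift: bndf t m (x+1) = k + bndf t' (m-1) x for 0 ≤ x
          have hshift : ∀ x : Int, 0 ≤ x → bndf t m (x + 1) = k + bndf t' (m - 1) x := by
            intro x hx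
            simp only [bndf, ← hq, ← hrdef, ← hq', ← hr', hq'eq, hr'eq, hk]
            have hexp : (x + 1) * q = x * q + q := by ring
            rw [hexp]
            generalize x * q = w
            split_ifs with h <;> omega
          have ha' : 0 ≤ bndf t' (m - 1) i := by
            simp only [bndf, ← hq', ← hr', hq'eq]
            have h1 : 0 ≤ i * q := mul_nonneg hj0 hq0
            have h2 : 0 ≤ min i r' := le_min hj0 hr'0
            linarith
          have hb' : 0 ≤ bndf t' (m - 1) (i + 1) := by
            simp only [bndf, ← hq', ← hr', hq'eq]
            have h1 : 0 ≤ (i + 1) * q := mul_nonneg (by omega) hq0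
            have h2 : 0 ≤ min (i + 1) r' := le_min (by omega) hr'0
            linarith
          have hs1 := hshift i hj0
          have hs2 := hshift (i + 1) (by omega)
          rw [PySem.List.slice_toNat _ ha' hb',
              PySem.List.slice_toNat _ (by rw [hs1]; linarith) (by rw [hs2]; linarith)]
          rw [List.drop_drop]
          have hdropeq : k.toNat + (bndf t' (m - 1) i).toNat = (bndf t m (i + 1)).toNat := by
            omega
          have htakeeq : (bndf t m (i + 1 + 1)).toNat - (bndf t m (i + 1)).toNat
              = (bndf t' (m - 1) (i + 1)).toNat - (bndf t' (m - 1) i).toNat := by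
            omega
          rw [hdropeq, htakeeq]
        rw [htail]
        simp [hb0, hb1]
      · rw [pvAltLoop_neg _ _ hmpos, PySem.List.pyRange_one_eq_nil (by omega : m ≤ 0)]
        simp

-- ===== VERDICT (by name: the statement is the Claim_ definition above) =====
theorem dividir_dados_spec : Claim_equal_dividir_dados := by
  intro data n _ hn
  unfold Spec_dividir_dados dividir_dados dividir_dados_alt
  simp only []
  rw [loopB n.toNat n (by omega) data []]
  rcases lt_or_gt_of_ne hn with hneg | hpos
  · rw [PySem.List.pyRange_one_eq_nil (by omega : n ≤ 0)]
    simp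
  · set q := PySem.Int.floordiv (data.length : Int) n with hq
    set r := PySem.Int.mod (data.length : Int) n with hr
    have hr0 : 0 ≤ r := mod_nonneg_of_pos _ n hpos
    have hz : (0 : Int) * q + min 0 r = 0 := by
      simp [min_eq_left hr0]
    have hA := foldA data n q r n.toNat 0 [] (by omega)
    rw [hz] at hA
    rw [hA]
    simp [bndf, ← hq, ← hr]
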